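-- pv_equiv track=rewrite | github.com/pkkgh1519/hermes-agent | tools/ppt_draft_engine.py | _split_points
-- ===== SOURCE A (Python) =====
-- def _split_points(value: str) -> list[str]:
--     normalized = str(value or "").replace("\r\n", "\n").replace("\r", "\n")
--     parts: list[str] = []
--     for line in normalized.split("\n"):
--         for chunk in line.split(";"):
--             cleaned = chunk.strip()
--             if cleaned:
--                 parts.append(cleaned)
--     return parts
-- ===== SOURCE B (Python) =====
-- def _split_points(value: str) -> list[str]:
--     # One single pass over the raw text with a character buffer: any of ';', '\r', '\n'
--     # ends the current chunk (so "\r\n" just yields an extra empty chunk, dropped by the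
--     # non-empty filter) -- no CRLF normalization and no nested splits needed.
--     text = str(value or "")
--     parts: list[str] = []
--     buf: list[str] = []
--     for ch in text:
--         if ch in ";\r\n":
--             piece = "".join(buf).strip()
--             if piece:
--                 parts.append(piece)
--             buf = []
--         else:
--             buf.append(ch)
--     piece = "".join(buf).strip()
--     if piece:
--         parts.append(piece)
--     return parts
-- ===== Notes on version B (the rewrite author's own statement) =====
-- stated objective: alternative
-- what changed: Replaces the CRLF-normalizing double replace plus nested newline/semicolon split passes with a single buffered left-to-right scan that flushes a stripped chunk at every separator character (a CRLF pair just yields an extra empty chunk, dropped by the non-empty filter).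
import Mathlib
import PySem

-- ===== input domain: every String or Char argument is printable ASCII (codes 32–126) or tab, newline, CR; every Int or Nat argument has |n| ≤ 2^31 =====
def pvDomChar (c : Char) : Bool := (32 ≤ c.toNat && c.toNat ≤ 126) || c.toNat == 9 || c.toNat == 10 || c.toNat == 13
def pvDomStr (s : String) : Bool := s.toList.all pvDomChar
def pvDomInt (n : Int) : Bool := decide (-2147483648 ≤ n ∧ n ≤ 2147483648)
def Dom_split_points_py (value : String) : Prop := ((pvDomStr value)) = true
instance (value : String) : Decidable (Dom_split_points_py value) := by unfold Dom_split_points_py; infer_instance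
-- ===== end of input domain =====

-- B replaces A's CRLF-normalizing double replace() and nested newline/semicolon split passes
-- with a single buffered scan over the raw characters (objective: alternative).

-- ===== PORT A =====
def split_points_py (value : String) : List String :=
  let text := if value == "" then "" else value        -- str(value or "")
  let normalized := PySem.Chars.replace (PySem.Chars.replace text.toList ['\r', '\n'] ['\n']) ['\r'] ['\n']
  (PySem.Chars.splitOn normalized ['\n']).foldl (fun parts line =>
    (PySem.Chars.splitOn line [';']).foldl (fun parts chunk =>
      let cleaned := PySem.Chars.strip chunk
      if cleaned ≠ [] then parts ++ [String.ofList cleaned] else parts) parts) []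

-- ===== PORT B =====
-- flush = "piece = ''.join(buf).strip(); if piece: parts.append(piece)"
def pvFlush (parts : List String) (buf : List Char) : List String :=
  let piece := PySem.Chars.strip buf
  if piece ≠ [] then parts ++ [String.ofList piece] else parts

def split_points_py_alt (value : String) : List String :=
  let text := if value == "" then "" else value        -- str(value or "")
  let st := text.toList.foldl (fun (acc : List String × List Char) ch =>
    if ch == ';' || ch == '\r' || ch == '\n' then (pvFlush acc.1 acc.2, ([] : List Char))
    else (acc.1, acc.2 ++ [ch])) ([], [])
  pvFlush st.1 st.2

-- ===== PRECONDITION & SPEC =====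
def Spec_split_points_py (value : String) (out : List String) : Prop := out = split_points_py_alt value
instance (value : String) (out : List String) : Decidable (Spec_split_points_py value out) := by unfold Spec_split_points_py; infer_instance

-- ===== CLAIM (what is proved, stated in full; the proofs are below) =====
def Claim_equal_split_points_py : Prop := ∀ (value : String), Dom_split_points_py value → Spec_split_points_py value (split_points_py value)

-- ===== LEMMAS AND PROOFS =====

-- canonical split of a char list at every character satisfying p
def pvSplitP (p : Char → Bool) : List Char → List (List Char)
  | [] => [[]]
  | c :: t => if p c then [] :: pvSplitP p t else (pvSplitP p t).modifyHead (c :: ·)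

-- structural version of A's replace("\r\n", "\n")
def pvNorm1 : List Char → List Char
  | [] => []
  | c :: t =>
    if c = '\r' ∧ t.head? = some '\n' then '\n' :: pvNorm1 t.tail
    else c :: pvNorm1 t
termination_by l => l.length
decreasing_by all_goals simp [List.length_tail]

-- structural version of A's replace("\r", "\n")
def pvMapCR (l : List Char) : List Char := l.map (fun c => if c = '\r' then '\n' else c)

-- strip every piece, keep the non-empty ones, as strings
def pvClean (ps : List (List Char)) : List String :=
  ps.foldl (fun parts chunk =>
    let cleaned := PySem.Chars.strip chunk
    if cleaned ≠ [] then parts ++ [String.ofList cleaned] else parts) []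

lemma pvSplitP_ne_nil (p : Char → Bool) (l : List Char) : pvSplitP p l ≠ [] := by
  induction l with
  | nil => simp [pvSplitP]
  | cons c t ih =>
    simp only [pvSplitP]
    split
    · simp
    · cases h : pvSplitP p t with
      | nil => exact absurd h ih
      | cons a b => simp

lemma pv_splitOn_go_eq (c : Char) (fuel : Nat) :
    ∀ (l cur : List Char) (acc : List (List Char)), l.length ≤ fuel →
    PySem.Chars.splitOn.go [c] fuel l cur acc
      = acc.reverse ++ (pvSplitP (fun x => x == c) l).modifyHead (cur.reverse ++ ·) := by
  induction fuel with
  | zero =>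
    intro l cur acc h
    have : l = [] := List.eq_nil_of_length_eq_zero (Nat.le_zero.mp h)
    subst this
    simp [PySem.Chars.splitOn.go, pvSplitP]
  | succ n ih =>
    intro l cur acc h
    cases l with
    | nil => simp [PySem.Chars.splitOn.go, pvSplitP]
    | cons ch rest =>
      simp only [PySem.Chars.splitOn.go]
      by_cases hc : ch = c
      · subst hc
        rw [if_pos (by simp [List.isPrefixOf])]
        simp only [List.length_cons] at h
        rw [ih _ _ _ (by simpa using h)]
        simp [pvSplitP, List.modifyHead]
        cases hs : pvSplitP (fun x => x == ch) rest <;> simp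
      · rw [if_neg (by simp [List.isPrefixOf]; exact fun he => absurd he.symm hc)]
        simp only [List.length_cons] at h
        rw [ih _ _ _ (by omega)]
        simp [pvSplitP, hc]
        cases hs : pvSplitP (fun x => x == c) rest <;> simp

-- A1: PySem splitOn with a singleton separator is pvSplitP
lemma pv_splitOn_singleton (c : Char) (l : List Char) :
    PySem.Chars.splitOn l [c] = pvSplitP (fun x => x == c) l := by
  rw [PySem.Chars.splitOn]
  rw [pv_splitOn_go_eq c (l.length + 1) l [] [] (by omega)]
  cases h : pvSplitP (fun x => x == c) l with
  | nil => exact absurd h (pvSplitP_ne_nil _ _)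
  | cons a b => simp

lemma pv_replace_cr_go (fuel : Nat) :
    ∀ (l acc : List Char), l.length ≤ fuel →
    PySem.Chars.replace.go ['\r'] ['\n'] fuel l acc = acc.reverse ++ pvMapCR l := by
  induction fuel with
  | zero =>
    intro l acc h
    have : l = [] := List.eq_nil_of_length_eq_zero (Nat.le_zero.mp h)
    subst this; simp [PySem.Chars.replace.go, pvMapCR]
  | succ n ih =>
    intro l acc h
    cases l with
    | nil => simp [PySem.Chars.replace.go, pvMapCR]
    | cons ch rest =>
      simp only [PySem.Chars.replace.go]
      simp only [List.length_cons] at h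
      by_cases hc : ch = '\r'
      · subst hc
        rw [if_pos (by simp [List.isPrefixOf])]
        rw [show List.drop (['\r'] : List Char).length ('\r' :: rest) = rest from rfl]
        rw [ih _ _ (by omega)]
        simp [pvMapCR]
      · rw [if_neg (by simp [List.isPrefixOf]; exact fun he => absurd he.symm hc)]
        rw [ih _ _ (by omega)]
        simp [pvMapCR, hc]

-- A2: replace "\r" -> "\n" is a character map
lemma pv_replace_cr (l : List Char) :
    PySem.Chars.replace l ['\r'] ['\n'] = pvMapCR l := by
  rw [PySem.Chars.replace]
  simp only [List.isEmpty_cons, if_false, Bool.false_eq_true]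
  exact pv_replace_cr_go l.length l [] (le_refl _)

lemma pvNorm1_crlf (t : List Char) : pvNorm1 ('\r' :: '\n' :: t) = '\n' :: pvNorm1 t := by
  rw [pvNorm1]; simp

lemma pvNorm1_cons (c : Char) (t : List Char) (h : ¬ (c = '\r' ∧ t.head? = some '\n')) :
    pvNorm1 (c :: t) = c :: pvNorm1 t := by
  rw [pvNorm1, if_neg h]

lemma pv_replace_crlf_go (fuel : Nat) :
    ∀ (l acc : List Char), l.length ≤ fuel →
    PySem.Chars.replace.go ['\r', '\n'] ['\n'] fuel l acc = acc.reverse ++ pvNorm1 l := by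
  induction fuel with
  | zero =>
    intro l acc h
    have : l = [] := List.eq_nil_of_length_eq_zero (Nat.le_zero.mp h)
    subst this; simp [PySem.Chars.replace.go, pvNorm1]
  | succ n ih =>
    intro l acc h
    cases l with
    | nil => simp [PySem.Chars.replace.go, pvNorm1]
    | cons ch rest =>
      simp only [PySem.Chars.replace.go]
      simp only [List.length_cons] at h
      by_cases hp : (['\r', '\n'] : List Char).isPrefixOf (ch :: rest)
      · rw [if_pos hp]
        obtain ⟨hc, t, ht⟩ : ch = '\r' ∧ ∃ t, rest = '\n' :: t := by
          cases rest with
          | nil => simp [List.isPrefixOf] at hp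
          | cons r2 t => simp [List.isPrefixOf] at hp; exact ⟨hp.1.symm, t, by rw [← hp.2]⟩
        subst hc; subst ht
        rw [show List.drop (['\r', '\n'] : List Char).length ('\r' :: '\n' :: t) = t from rfl]
        simp only [List.length_cons] at h
        rw [ih _ _ (by omega)]
        simp [pvNorm1_crlf]
      · rw [if_neg hp]
        rw [ih _ _ (by omega)]
        rw [pvNorm1_cons ch rest (by
          rintro ⟨hc, hh⟩
          subst hc
          cases rest with
          | nil => simp at hh
          | cons r2 t => simp at hh; subst hh; simp [List.isPrefixOf] at hp)]
        simp

-- A3: replace "\r\n" -> "\n" is pvNorm1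
lemma pv_replace_crlf (l : List Char) :
    PySem.Chars.replace l ['\r', '\n'] ['\n'] = pvNorm1 l := by
  rw [PySem.Chars.replace]
  simp only [List.isEmpty_cons, if_false, Bool.false_eq_true]
  exact pv_replace_crlf_go l.length l [] (le_refl _)

lemma pvClean_foldl (X : List (List Char)) (acc : List String) :
    X.foldl (fun parts chunk =>
      let cleaned := PySem.Chars.strip chunk
      if cleaned ≠ [] then parts ++ [String.ofList cleaned] else parts) acc
    = acc ++ pvClean X := by
  induction X generalizing acc with
  | nil => simp [pvClean]
  | cons h t ih =>
    simp only [List.foldl_cons, pvClean]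
    rw [ih, ih]
    split <;> simp

lemma pvClean_cons (h : List Char) (X : List (List Char)) :
    pvClean (h :: X)
      = (if PySem.Chars.strip h ≠ [] then [String.ofList (PySem.Chars.strip h)] else []) ++ pvClean X := by
  simp only [pvClean, List.foldl_cons]
  rw [pvClean_foldl]
  split <;> simp [pvClean]

lemma pvClean_append (X Y : List (List Char)) : pvClean (X ++ Y) = pvClean X ++ pvClean Y := by
  induction X with
  | nil => simp [pvClean]
  | cons h t ih => simp only [List.cons_append, pvClean_cons, ih, List.append_assoc]

lemma pvClean_nil_cons (X : List (List Char)) : pvClean ([] :: X) = pvClean X := by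
  rw [pvClean_cons]
  simp [PySem.Chars.strip, PySem.Chars.lstrip, PySem.Chars.rstrip]

-- A5: nested splitting fuses into one split on the union predicate
lemma pv_split_nest (p q : Char → Bool) (m : List Char) :
    (pvSplitP p m).flatMap (pvSplitP q) = pvSplitP (fun c => p c || q c) m := by
  induction m with
  | nil => simp [pvSplitP]
  | cons c t ih =>
    by_cases hp : p c
    · simp only [pvSplitP, hp, if_pos, Bool.true_or, List.flatMap_cons]
      rw [← ih]
      simp [pvSplitP]
    · obtain ⟨h0, X, hX⟩ : ∃ h0 X, pvSplitP p t = h0 :: X := by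
        cases h : pvSplitP p t with
        | nil => exact absurd h (pvSplitP_ne_nil _ _)
        | cons a b => exact ⟨a, b, rfl⟩
      by_cases hq : q c
      · simp only [pvSplitP, hp, Bool.false_eq_true, if_false, hq, Bool.or_true, if_true, hX,
          List.modifyHead, List.flatMap_cons]
        rw [← ih, hX]
        simp [pvSplitP, hq, List.flatMap_cons]
      · simp only [pvSplitP, hp, hq, Bool.false_eq_true, if_false, Bool.or_self, hX,
          List.modifyHead, List.flatMap_cons]
        rw [← ih, hX]
        simp only [List.flatMap_cons, pvSplitP, hq, Bool.false_eq_true, if_false]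
        obtain ⟨g0, Y, hY⟩ : ∃ g0 Y, pvSplitP q h0 = g0 :: Y := by
          cases hg : pvSplitP q h0 with
          | nil => exact absurd hg (pvSplitP_ne_nil _ _)
          | cons a b => exact ⟨a, b, rfl⟩
        rw [hY]
        simp [List.modifyHead]

-- A6: mapping '\r' to '\n' before splitting on {';','\n'} = splitting on {';','\r','\n'}
lemma pv_split_mapCR (m : List Char) :
    pvSplitP (fun c => c == '\n' || c == ';') (pvMapCR m)
      = pvSplitP (fun c => c == ';' || c == '\r' || c == '\n') m := by
  induction m with
  | nil => simp [pvSplitP, pvMapCR]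
  | cons c t ih =>
    simp only [pvMapCR, List.map_cons] at *
    by_cases hc : c = '\r'
    · subst hc
      simp only [if_pos rfl, pvSplitP]
      rw [ih]
      simp
    · simp only [if_neg hc, pvSplitP]
      rw [ih]
      by_cases h1 : c = '\n' <;> by_cases h2 : c = ';' <;> simp [h1, h2, hc]

-- A7: collapsing "\r\n" only removes empty pieces, invisible after cleaning
lemma pv_clean_norm1_aux (n : Nat) :
    ∀ m : List Char, m.length ≤ n →
    (pvSplitP (fun c => c == ';' || c == '\r' || c == '\n') (pvNorm1 m)).head?
      = (pvSplitP (fun c => c == ';' || c == '\r' || c == '\n') m).head?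
    ∧ pvClean (pvSplitP (fun c => c == ';' || c == '\r' || c == '\n') (pvNorm1 m))
      = pvClean (pvSplitP (fun c => c == ';' || c == '\r' || c == '\n') m) := by
  induction n with
  | zero =>
    intro m h
    have : m = [] := List.eq_nil_of_length_eq_zero (Nat.le_zero.mp h)
    subst this; simp [pvNorm1]
  | succ n ih =>
    intro m h
    cases m with
    | nil => simp [pvNorm1]
    | cons c t =>
      by_cases hcr : c = '\r' ∧ t.head? = some '\n'
      · obtain ⟨hc, hh⟩ := hcr
        subst hc
        obtain ⟨t', ht⟩ : ∃ t', t = '\n' :: t' := by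
          cases t with
          | nil => simp at hh
          | cons a b => simp at hh; subst hh; exact ⟨b, rfl⟩
        subst ht
        rw [pvNorm1, if_pos ⟨rfl, rfl⟩]
        simp only [List.tail_cons]
        simp only [List.length_cons] at h
        obtain ⟨ih1, ih2⟩ := ih t' (by omega)
        constructor
        · simp only [pvSplitP]
          norm_num
        · simp only [pvSplitP]
          norm_num
          rw [pvClean_nil_cons, pvClean_nil_cons, pvClean_nil_cons, ih2]
      · rw [pvNorm1, if_neg hcr]
        simp only [List.length_cons] at h
        obtain ⟨ih1, ih2⟩ := ih t (by omega)
        by_cases hp : (c == ';' || c == '\r' || c == '\n') = true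
        · simp only [pvSplitP, hp, if_true]
          exact ⟨by simp, by rw [pvClean_nil_cons, pvClean_nil_cons, ih2]⟩
        · simp only [pvSplitP, hp, Bool.false_eq_true, if_false]
          obtain ⟨h1, A, hA⟩ : ∃ h1 A, pvSplitP (fun c => c == ';' || c == '\r' || c == '\n') (pvNorm1 t) = h1 :: A := by
            cases hx : pvSplitP (fun c => c == ';' || c == '\r' || c == '\n') (pvNorm1 t) with
            | nil => exact absurd hx (pvSplitP_ne_nil _ _)
            | cons a b => exact ⟨a, b, rfl⟩
          obtain ⟨h2, B, hB⟩ : ∃ h2 B, pvSplitP (fun c => c == ';' || c == '\r' || c == '\n') t = h2 :: B := by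
            cases hx : pvSplitP (fun c => c == ';' || c == '\r' || c == '\n') t with
            | nil => exact absurd hx (pvSplitP_ne_nil _ _)
            | cons a b => exact ⟨a, b, rfl⟩
          rw [hA, hB] at ih1 ih2 ⊢
          simp only [List.head?_cons, Option.some.injEq] at ih1
          subst ih1
          rw [pvClean_cons, pvClean_cons] at ih2
          have hAB : pvClean A = pvClean B := List.append_cancel_left ih2
          simp only [List.modifyHead, List.head?_cons, true_and]
          rw [pvClean_cons, pvClean_cons, hAB]

lemma pv_clean_norm1 (m : List Char) :
    pvClean (pvSplitP (fun c => c == ';' || c == '\r' || c == '\n') (pvNorm1 m))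
      = pvClean (pvSplitP (fun c => c == ';' || c == '\r' || c == '\n') m) :=
  (pv_clean_norm1_aux m.length m (le_refl _)).2

lemma pvClean_flatMap (L : List (List Char)) (q : Char → Bool) :
    L.flatMap (fun line => pvClean (pvSplitP q line)) = pvClean (L.flatMap (pvSplitP q)) := by
  induction L with
  | nil => simp [pvClean]
  | cons h t ih => simp [List.flatMap_cons, pvClean_append, ih]

-- the double foldl of port A is pvClean of the fused split
lemma pvA_shape (m : List Char) :
    (PySem.Chars.splitOn m ['\n']).foldl (fun parts line =>
      (PySem.Chars.splitOn line [';']).foldl (fun parts chunk =>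
        let cleaned := PySem.Chars.strip chunk
        if cleaned ≠ [] then parts ++ [String.ofList cleaned] else parts) parts) []
    = pvClean (pvSplitP (fun c => (c == '\n') || (c == ';')) m) := by
  have hout : ∀ (L : List (List Char)) (acc : List String),
      L.foldl (fun parts line =>
        (PySem.Chars.splitOn line [';']).foldl (fun parts chunk =>
          let cleaned := PySem.Chars.strip chunk
          if cleaned ≠ [] then parts ++ [String.ofList cleaned] else parts) parts) acc
      = acc ++ L.flatMap (fun line => pvClean (pvSplitP (fun x => x == ';') line)) := by
    intro L
    induction L with
    | nil => simp
    | cons h t ih =>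
      intro acc
      simp only [List.foldl_cons, List.flatMap_cons]
      rw [pv_splitOn_singleton, pvClean_foldl, ih, List.append_assoc]
  rw [pv_splitOn_singleton, hout, List.nil_append, pvClean_flatMap, pv_split_nest]

-- the scan of port B is pvClean of the split
lemma pvB_go (cs : List Char) :
    ∀ (parts : List String) (buf : List Char),
    (let st := cs.foldl (fun (acc : List String × List Char) ch =>
        if ch == ';' || ch == '\r' || ch == '\n' then (pvFlush acc.1 acc.2, ([] : List Char))
        else (acc.1, acc.2 ++ [ch])) (parts, buf)
     pvFlush st.1 st.2)
    = parts ++ pvClean ((pvSplitP (fun c => c == ';' || c == '\r' || c == '\n') cs).modifyHead (buf ++ ·)) := by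
  induction cs with
  | nil =>
    intro parts buf
    simp only [List.foldl_nil, pvSplitP, List.modifyHead, List.append_nil]
    rw [pvClean_cons]
    simp only [pvFlush, pvClean, List.foldl_nil]
    split <;> simp
  | cons c cs' ih =>
    intro parts buf
    by_cases hp : (c == ';' || c == '\r' || c == '\n') = true
    · simp only [List.foldl_cons, hp, if_true, pvSplitP]
      rw [ih]
      have hmod : ∀ X : List (List Char), X.modifyHead (fun x => [] ++ x) = X := by
        intro X; cases X <;> simp
      rw [hmod]
      simp only [List.modifyHead, List.append_nil]
      rw [pvClean_cons]
      simp [pvFlush]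
      split <;> simp
    · simp only [List.foldl_cons, hp, Bool.false_eq_true, if_false, pvSplitP]
      rw [ih]
      obtain ⟨h1, A, hA⟩ : ∃ h1 A, pvSplitP (fun c => c == ';' || c == '\r' || c == '\n') cs' = h1 :: A := by
        cases hx : pvSplitP (fun c => c == ';' || c == '\r' || c == '\n') cs' with
        | nil => exact absurd hx (pvSplitP_ne_nil _ _)
        | cons a b => exact ⟨a, b, rfl⟩
      rw [hA]
      simp [List.modifyHead, List.append_assoc]

lemma pvB_shape (m : List Char) :
    pvClean (pvSplitP (fun c => c == ';' || c == '\r' || c == '\n') m)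
    = pvFlush (m.foldl (fun (acc : List String × List Char) ch =>
        if ch == ';' || ch == '\r' || ch == '\n' then (pvFlush acc.1 acc.2, ([] : List Char))
        else (acc.1, acc.2 ++ [ch])) ([], [])).1
      (m.foldl (fun (acc : List String × List Char) ch =>
        if ch == ';' || ch == '\r' || ch == '\n' then (pvFlush acc.1 acc.2, ([] : List Char))
        else (acc.1, acc.2 ++ [ch])) ([], [])).2 := by
  rw [pvB_go m [] []]
  have hmod : ∀ X : List (List Char), X.modifyHead (fun x => [] ++ x) = X := by
    intro X; cases X <;> simp
  rw [hmod, List.nil_append]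

-- ===== VERDICT (by name: the statement is the Claim_ definition above) =====
theorem split_points_py_spec : Claim_equal_split_points_py := by
  intro value _
  unfold Spec_split_points_py split_points_py split_points_py_alt
  simp only [pvA_shape, pv_replace_cr, pv_replace_crlf, pv_split_mapCR]
  rw [pv_clean_norm1, pvB_shape]
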